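-- pv_equiv track=rewrite | github.com/Markram-WS/Binance | system/utils.py | precision_format
-- ===== SOURCE A (Python) =====
-- def precision_format(text):
--     begincount = False
--     precision_text = '0.'
--     text = str(text)
--     for i in range(len(text)):
--         if text[i] == '.':
--             begincount = True
--         if begincount and text[i] != '.':
--             precision_text = precision_text + '0'
--         elif begincount and i == len(text)-1:
--             precision_text = precision_text + '1'
--     return precision_text
-- ===== SOURCE B (Python) =====
-- def precision_format(text):
--     s = str(text)
--     idx = s.find('.')
--     if idx == -1:
--         return '0.'
--     frac = s[idx + 1:]
--     return '0.' + '0' * sum(c != '.' for c in frac)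
-- ===== Notes on version B (the rewrite author's own statement) =====
-- stated objective: simpler
-- what changed: Replaces the stateful character-by-character scan with its begincount flag by find('.'), a slice, and a direct count of the non-dot characters after the first dot; B intentionally drops A's spurious trailing '1' on dot-terminated strings (declared as D_).
-- intended difference: On inputs that contain '.' and whose last character is '.', A appends a spurious '1' left over from its loop state, e.g. '1.' -> '0.1'; B returns just '0.' plus one '0' per non-dot character after the first dot, e.g. '1.' -> '0.', which is the intended count of decimal places. — e.g. on precision_format("1."): A returns "0.1", B returns "0."
import Mathlib
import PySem

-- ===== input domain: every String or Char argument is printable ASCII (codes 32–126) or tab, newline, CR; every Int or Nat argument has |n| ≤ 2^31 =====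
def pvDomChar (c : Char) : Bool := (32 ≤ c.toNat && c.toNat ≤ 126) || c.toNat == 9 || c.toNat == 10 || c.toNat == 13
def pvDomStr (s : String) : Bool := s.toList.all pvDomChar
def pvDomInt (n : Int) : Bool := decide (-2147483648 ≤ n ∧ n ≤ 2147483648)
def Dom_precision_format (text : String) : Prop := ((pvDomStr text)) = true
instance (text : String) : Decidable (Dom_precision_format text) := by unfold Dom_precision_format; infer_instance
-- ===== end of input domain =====

-- B replaces A's stateful flag-scan by find('.') + slice + a count of non-dot characters (simpler);
-- on dot-terminated inputs B intentionally drops A's spurious trailing '1' (see D_ below).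

-- ===== PORT A =====
-- the for-loop over range(len(text)) with state (begincount, precision_text); i is the index, n = len(text)
def pfLoop : List Char → Nat → Nat → Bool → List Char → List Char
  | [], _, _, _, acc => acc
  | c :: cs, i, n, b, acc =>
      let b' := if c = '.' then true else b
      if b' ∧ c ≠ '.' then pfLoop cs (i + 1) n b' (acc ++ ['0'])
      else if b' ∧ i = n - 1 then pfLoop cs (i + 1) n b' (acc ++ ['1'])
      else pfLoop cs (i + 1) n b' acc

def precision_format (text : String) : String :=
  String.ofList (pfLoop text.toList 0 text.toList.length false ['0', '.'])

-- ===== PORT B =====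
def precision_format_alt (text : String) : String :=
  let idx := PySem.Str.find text "."
  if idx = -1 then "0."
  else
    let frac := PySem.Str.slice text (some (idx + 1)) none
    String.ofList ('0' :: '.' :: List.replicate (frac.toList.countP (fun c => c ≠ '.')) '0')

-- ===== PRECONDITION & SPEC =====
-- On inputs that contain '.' and whose last character is '.', A appends a spurious '1' left over
-- from its loop state, e.g. '1.' -> '0.1'; B returns just '0.' plus one '0' per non-dot character
-- after the first dot, e.g. '1.' -> '0.', which is the intended count of decimal places.
def D_precision_format (text : String) : Prop := text.toList.getLast? = some '.'
instance (text : String) : Decidable (D_precision_format text) := by unfold D_precision_format; infer_instance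
def Spec_precision_format (text : String) (out : String) : Prop := ¬ D_precision_format text → out = precision_format_alt text
instance (text : String) (out : String) : Decidable (Spec_precision_format text out) := by unfold Spec_precision_format; infer_instance
def pvDiffWitness_precision_format : String := "1."
def pvDiffWitnessOut_precision_format : String × String := ("0.1", "0.")

-- ===== CLAIM (what is proved, stated in full; the proofs are below) =====
def Claim_unchanged_precision_format : Prop := ∀ (text : String), Dom_precision_format text → Spec_precision_format text (precision_format text)
def Claim_changed_precision_format : Prop := Dom_precision_format (pvDiffWitness_precision_format) ∧ D_precision_format (pvDiffWitness_precision_format) ∧ precision_format (pvDiffWitness_precision_format) = pvDiffWitnessOut_precision_format.1 ∧ precision_format_alt (pvDiffWitness_precision_format) = pvDiffWitnessOut_precision_format.2 ∧ pvDiffWitnessOut_precision_format.1 ≠ pvDiffWitnessOut_precision_format.2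
def Claim_exact_precision_format : Prop := ∀ (text : String), Dom_precision_format text → D_precision_format text → precision_format text ≠ precision_format_alt text

-- ===== LEMMAS AND PROOFS =====

theorem pfLoop_cons (c : Char) (cs : List Char) (i n : Nat) (b : Bool) (acc : List Char) :
    pfLoop (c :: cs) i n b acc =
      (let b' := if c = '.' then true else b
       if b' ∧ c ≠ '.' then pfLoop cs (i + 1) n b' (acc ++ ['0'])
       else if b' ∧ i = n - 1 then pfLoop cs (i + 1) n b' (acc ++ ['1'])
       else pfLoop cs (i + 1) n b' acc) := rfl

-- before the first dot the loop only advances the index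
theorem pfLoop_skip (pre : List Char) (t : List Char) (i n : Nat) (acc : List Char)
    (h : '.' ∉ pre) : pfLoop (pre ++ t) i n false acc = pfLoop t (i + pre.length) n false acc := by
  induction pre generalizing i with
  | nil => simp
  | cons c cs ih =>
      simp only [List.mem_cons, not_or] at h
      have hc : ¬ (c = '.') := fun e => h.1 e.symm
      rw [List.cons_append, pfLoop_cons]
      simp only [if_neg hc]
      rw [if_neg (by simp [hc]), if_neg (by simp), ih _ h.2]
      congr 1
      simp only [List.length_cons]
      omega

-- once the flag is set: one '0' per non-dot char, a trailing '1' iff the last char is a dot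
theorem pfLoop_zeros (cs : List Char) (i n : Nat) (acc : List Char)
    (h : i + cs.length = n) :
    pfLoop cs i n true acc =
      acc ++ List.replicate (cs.countP (fun c => c ≠ '.')) '0'
          ++ (if cs.getLast? = some '.' then ['1'] else []) := by
  induction cs generalizing i acc with
  | nil => simp [pfLoop]
  | cons c cs ih =>
      have hn : i + cs.length + 1 = n := by simpa using h
      by_cases hc : c = '.'
      · subst hc
        rcases cs with _ | ⟨d, ds⟩
        · have hi : i = n - 1 := by simp at hn; omega
          rw [pfLoop_cons]
          simp [pfLoop, hi]
        · simp only [List.length_cons] at hn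
          have hi : ¬ (i = n - 1) := by omega
          have h1 : pfLoop ('.' :: d :: ds) i n true acc = pfLoop (d :: ds) (i + 1) n true acc := by
            rw [pfLoop_cons]; simp [hi]
          rw [h1, ih (i + 1) _ (by simp at hn ⊢; omega)]
          simp
      · have h1 : pfLoop (c :: cs) i n true acc = pfLoop cs (i + 1) n true (acc ++ ['0']) := by
          rw [pfLoop_cons]; simp [hc]
        rw [h1, ih (i + 1) _ (by omega)]
        rcases cs with _ | ⟨d, ds⟩
        · simp [hc]
        · simp [List.countP_cons, hc, List.replicate_succ]

-- the loop entering at the first dot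
theorem pfLoop_dot (rest : List Char) (i n : Nat) (acc : List Char)
    (h : i + ('.' :: rest).length = n) :
    pfLoop ('.' :: rest) i n false acc =
      acc ++ List.replicate (rest.countP (fun c => c ≠ '.')) '0'
          ++ (if ('.' :: rest).getLast? = some '.' then ['1'] else []) := by
  have hn : i + rest.length + 1 = n := by simpa using h
  rcases rest with _ | ⟨d, ds⟩
  · have hi : i = n - 1 := by simp at hn; omega
    rw [pfLoop_cons]
    simp [pfLoop, hi]
  · simp only [List.length_cons] at hn
    have hi : ¬ (i = n - 1) := by omega
    have h1 : pfLoop ('.' :: d :: ds) i n false acc = pfLoop (d :: ds) (i + 1) n true acc := by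
      rw [pfLoop_cons]; simp [hi]
    rw [h1, pfLoop_zeros _ (i + 1) n acc (by simp; omega)]
    simp

-- first-dot decomposition of the input from PySem's find
theorem find_dot_decomp (s : List Char) (h : PySem.Chars.find s ['.'] ≠ -1) :
    ∃ pre rest, s = pre ++ '.' :: rest ∧ '.' ∉ pre ∧
      pre.length = (PySem.Chars.find s ['.']).toNat := by
  have hnn : 0 ≤ PySem.Chars.find s ['.'] := by
    have := PySem.Chars.neg_one_le_find s ['.']
    omega
  obtain ⟨hpre, hmin⟩ := PySem.Chars.find_spec hnn
  set j := (PySem.Chars.find s ['.']).toNat with hj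
  have hjlen : j ≤ s.length := by
    have := PySem.Chars.find_le_length s ['.']
    omega
  rw [List.cons_prefix_iff] at hpre
  obtain ⟨rest, hr, -⟩ := hpre
  refine ⟨s.take j, rest, ?_, ?_, by simp [hjlen]⟩
  · conv_lhs => rw [← List.take_append_drop j s, hr]
  · intro hmem
    obtain ⟨k, hk, hkv⟩ := List.mem_iff_getElem.mp hmem
    have hklt : k < j := by simpa using lt_of_lt_of_le hk (by simp)
    have hks : k < s.length := lt_of_lt_of_le hklt hjlen
    have hsk : s[k] = '.' := by
      rw [← List.getElem_take (xs := s) (j := j) (h := hk), hkv]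
    refine hmin k hklt ?_
    rw [List.drop_eq_getElem_cons hks, List.cons_prefix_iff]
    exact ⟨s.drop (k + 1), by rw [hsk], List.nil_prefix⟩

-- the single characterisation of A both claims use
theorem precision_format_eq (text : String) :
    precision_format text =
      if PySem.Chars.find text.toList ['.'] = -1 then "0."
      else String.ofList (('0' :: '.' ::
              List.replicate ((text.toList.drop ((PySem.Chars.find text.toList ['.']).toNat + 1)).countP
                (fun c => c ≠ '.')) '0')
            ++ (if text.toList.getLast? = some '.' then ['1'] else [])) := by
  unfold precision_format
  by_cases h : PySem.Chars.find text.toList ['.'] = -1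
  · rw [if_pos h]
    have hnd : '.' ∉ text.toList := by
      intro hm
      exact ((PySem.Chars.find_eq_neg_one_iff text.toList ['.']).mp h)
        ((List.singleton_infix_iff _ _).mpr hm)
    have := pfLoop_skip text.toList [] 0 text.toList.length ['0', '.'] hnd
    simp only [List.append_nil] at this
    rw [this]
    rfl
  · rw [if_neg h]
    obtain ⟨pre, rest, hs, hnd, hlen⟩ := find_dot_decomp text.toList h
    rw [← hlen]
    have hdrop : text.toList.drop (pre.length + 1) = rest := by
      rw [hs, List.drop_append]
      simp
    rw [hdrop]
    have hlast : text.toList.getLast? = ('.' :: rest).getLast? := by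
      rw [hs]; exact List.getLast?_append_of_ne_nil pre (by simp)
    rw [hlast]
    conv_lhs => rw [hs]
    rw [pfLoop_skip pre _ 0 _ _ hnd, Nat.zero_add,
      pfLoop_dot rest pre.length _ _ (by simp)]
    simp

-- B's port, rewritten to the same shape
theorem precision_format_alt_eq (text : String) :
    precision_format_alt text =
      if PySem.Chars.find text.toList ['.'] = -1 then "0."
      else String.ofList ('0' :: '.' ::
              List.replicate ((text.toList.drop ((PySem.Chars.find text.toList ['.']).toNat + 1)).countP
                (fun c => c ≠ '.')) '0') := by
  unfold precision_format_alt
  simp only [PySem.Str.find_eq]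
  have hdl : (".").toList = ['.'] := rfl
  rw [hdl]
  by_cases h : PySem.Chars.find text.toList ['.'] = -1
  · rw [if_pos h, if_pos h]
  · rw [if_neg h, if_neg h]
    have hge : -1 ≤ PySem.Chars.find text.toList ['.'] :=
      PySem.Chars.neg_one_le_find text.toList ['.']
    have hfr : (PySem.Str.slice text (some (PySem.Chars.find text.toList ['.'] + 1)) none).toList
        = text.toList.drop ((PySem.Chars.find text.toList ['.']).toNat + 1) := by
      rw [PySem.Str.toList_slice, PySem.Chars.slice_eq_listSlice,
        PySem.List.slice_from _ (by omega)]
      congr 1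
      omega
    rw [hfr]

-- ===== VERDICT (by name: the statement is the Claim_ definition above) =====
theorem precision_format_spec : Claim_unchanged_precision_format := by
  intro text _ hD
  rw [precision_format_eq, precision_format_alt_eq]
  by_cases h : PySem.Chars.find text.toList ['.'] = -1
  · rw [if_pos h, if_pos h]
  · rw [if_neg h, if_neg h, if_neg (by exact hD)]
    simp

theorem precision_format_changed : Claim_changed_precision_format := by
  unfold Claim_changed_precision_format; decide

theorem precision_format_tight : Claim_exact_precision_format := by
  intro text _ hD
  rw [precision_format_eq, precision_format_alt_eq]
  have hmem : '.' ∈ text.toList := List.mem_of_getLast? hD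
  have h : PySem.Chars.find text.toList ['.'] ≠ -1 := by
    intro h
    exact ((PySem.Chars.find_eq_neg_one_iff text.toList ['.']).mp h)
      ((List.singleton_infix_iff _ _).mpr hmem)
  rw [if_neg h, if_neg h, if_pos (by exact hD)]
  intro heq
  have hl := String.ofList_inj.mp heq
  have hlen := congrArg List.length hl
  simp at hlen
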